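-- pv_equiv track=rewrite | github.com/Adineamtu/BladeEye-Automated-Detection-Monitor | bladeeye_pro/capture_lab.py | decode_manchester
-- ===== SOURCE A (Python) =====
-- def decode_manchester(bits: str) -> str:
--     clean = "".join(b for b in bits if b in {"0", "1"})
--     pairs = [clean[i : i + 2] for i in range(0, len(clean) - 1, 2)]
--     out = []
--     for p in pairs:
--         if p == "01":
--             out.append("0")
--         elif p == "10":
--             out.append("1")
--     return "".join(out)
-- ===== SOURCE B (Python) =====
-- def decode_manchester(bits: str) -> str:
--     out = []
--     pending = None
--     for b in bits:
--         if b not in ("0", "1"):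
--             continue
--         if pending is None:
--             pending = b
--         else:
--             if pending != b:
--                 out.append(pending)
--             pending = None
--     return "".join(out)
-- ===== Notes on version B (the rewrite author's own statement) =====
-- stated objective: alternative
-- what changed: Replaces A's three passes (filter, index-range chunking into two-character slices, slice-to-bit mapping) with a single streaming state machine over the raw string that keeps one pending bit and emits it when a mismatched pair completes.
import Mathlib
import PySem

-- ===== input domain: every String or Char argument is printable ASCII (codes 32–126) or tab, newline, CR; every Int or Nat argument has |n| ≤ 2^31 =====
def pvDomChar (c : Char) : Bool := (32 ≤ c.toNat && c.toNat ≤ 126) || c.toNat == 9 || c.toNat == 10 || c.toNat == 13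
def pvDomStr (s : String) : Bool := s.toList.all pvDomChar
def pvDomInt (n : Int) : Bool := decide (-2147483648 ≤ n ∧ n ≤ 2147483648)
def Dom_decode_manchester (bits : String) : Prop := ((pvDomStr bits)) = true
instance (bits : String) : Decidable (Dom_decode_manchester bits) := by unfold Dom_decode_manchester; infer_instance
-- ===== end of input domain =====

-- B replaces A's filter + chunk + map passes with one streaming pass keeping a pending bit; same results, similar cost.

-- ===== PORT A =====
def decode_manchester (bits : String) : String :=
  let clean := bits.toList.filter (fun b => b == '0' || b == '1')
  let pairs := (PySem.List.pyRange 0 ((clean.length : Int) - 1) 2).map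
      (fun i => PySem.List.slice clean (some i) (some (i + 2)))
  let out := pairs.foldl (fun out p =>
      if p = ['0', '1'] then out ++ ['0']
      else if p = ['1', '0'] then out ++ ['1']
      else out) ([] : List Char)
  String.mk out

-- ===== PORT B =====
def altStep (st : List Char × Option Char) (b : Char) : List Char × Option Char :=
  if ¬ (b = '0' ∨ b = '1') then st
  else
    match st.2 with
    | none => (st.1, some b)
    | some p => ((if p ≠ b then st.1 ++ [p] else st.1), none)

def decode_manchester_alt (bits : String) : String :=
  String.mk (bits.toList.foldl altStep ([], none)).1

-- ===== PRECONDITION & SPEC =====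
def Spec_decode_manchester (bits : String) (out : String) : Prop := out = decode_manchester_alt bits
instance (bits : String) (out : String) : Decidable (Spec_decode_manchester bits out) := by unfold Spec_decode_manchester; infer_instance

-- ===== CLAIM (what is proved, stated in full; the proofs are below) =====
def Claim_equal_decode_manchester : Prop := ∀ (bits : String), Dom_decode_manchester bits → Spec_decode_manchester bits (decode_manchester bits)

-- ===== LEMMAS AND PROOFS =====

-- common specification: decode consecutive pairs, emitting the first bit of each unequal pair
def mspec : List Char → List Char
  | a :: b :: rest => (if a ≠ b then [a] else []) ++ mspec rest
  | _ => []

def pairsOf (l : List Char) : List (List Char) :=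
  (PySem.List.pyRange 0 ((l.length : Int) - 1) 2).map
    (fun i => PySem.List.slice l (some i) (some (i + 2)))

lemma pairsOf_nil : pairsOf [] = [] := by decide

lemma pairsOf_single (a : Char) : pairsOf [a] = [] := by
  simp [pairsOf, PySem.List.pyRange]

lemma pairsOf_cons_cons (a b : Char) (rest : List Char) :
    pairsOf (a :: b :: rest) = [a, b] :: pairsOf rest := by
  unfold pairsOf
  rw [PySem.List.pyRange_of_pos _ _ (by norm_num), PySem.List.pyRange_of_pos _ _ (by norm_num)]
  have hn : ((((a :: b :: rest : List Char)).length : Int) - 1 - 0 + 2 - 1) / 2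
      = ((rest.length : Int) - 1 - 0 + 2 - 1) / 2 + 1 := by
    simp only [List.length_cons]
    push_cast
    omega
  have h1 : (0 : Int) < (((a :: b :: rest : List Char)).length : Int) - 1 := by
    simp only [List.length_cons]; push_cast; omega
  rw [if_pos h1, hn]
  have hhead : PySem.List.slice (a :: b :: rest) (some ((0 : Int) + 2 * ((0 : Nat) : Int)))
      (some ((0 : Int) + 2 * ((0 : Nat) : Int) + 2)) = [a, b] := by
    norm_num [PySem.List.slice, PySem.List.clampIdx]
    rw [show min (Int.toNat 2) (rest.length + 1 + 1) = 2 by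
      rw [show Int.toNat 2 = 2 from rfl]; omega]
    rfl
  by_cases hm : (0 : Int) < (rest.length : Int) - 1
  · rw [if_pos hm]
    have hpos : 0 ≤ ((rest.length : Int) - 1 - 0 + 2 - 1) / 2 := by omega
    rw [Int.toNat_add hpos (by norm_num)]
    simp only [Int.toNat_one]
    rw [List.range_succ_eq_map]
    simp only [List.map_cons, List.map_map]
    refine List.cons_eq_cons.mpr ⟨hhead, ?_⟩
    apply List.map_congr_left
    intro k _
    simp only [Function.comp, Nat.succ_eq_add_one]
    have e1 : (0 : Int) + 2 * ((k + 1 : Nat) : Int) = ((2 * k + 2 : Nat) : Int) := by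
      push_cast; ring
    have e2 : (0 : Int) + 2 * ((k + 1 : Nat) : Int) + 2 = ((2 * k + 2 : Nat) : Int) + ((2 : Nat) : Int) := by
      push_cast; ring
    have e3 : (0 : Int) + 2 * ((k : Nat) : Int) = ((2 * k : Nat) : Int) := by push_cast; ring
    have e4 : (0 : Int) + 2 * ((k : Nat) : Int) + 2 = ((2 * k : Nat) : Int) + ((2 : Nat) : Int) := by
      push_cast; ring
    rw [e2, e1, e4, e3, PySem.List.slice_natCast_add, PySem.List.slice_natCast_add]
    rw [show 2 * k + 2 = 2 * k + 1 + 1 by ring]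
    rw [List.drop_succ_cons, List.drop_succ_cons]
  · -- rest has length ≤ 1: the tail list of pairs is empty and the head list has exactly one pair
    rw [if_neg hm]
    have hr0 : (((rest.length : Int) - 1 - 0 + 2 - 1) / 2 + 1).toNat = 1 := by omega
    rw [hr0]
    simp only [List.range_one, List.map_cons, List.map_nil]
    exact List.cons_eq_cons.mpr ⟨hhead, rfl⟩

lemma foldA_eq (l : List Char) (hb : ∀ x ∈ l, x = '0' ∨ x = '1') :
    ∀ acc : List Char,
      (pairsOf l).foldl (fun out p =>
        if p = ['0', '1'] then out ++ ['0']
        else if p = ['1', '0'] then out ++ ['1']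
        else out) acc = acc ++ mspec l := by
  induction l using mspec.induct with
  | case1 a b rest ih =>
    intro acc
    have ha := hb a (by simp)
    have hbb := hb b (by simp)
    rw [pairsOf_cons_cons]
    simp only [List.foldl_cons]
    rw [ih (fun x hx => hb x (by simp [hx]))]
    rcases ha with ha | ha <;> rcases hbb with hb2 | hb2 <;> subst ha <;> subst hb2 <;>
      simp <;> (conv_rhs => rw [mspec.eq_def]) <;> simp
  | case2 l hl =>
    intro acc
    match l, hl with
    | [], _ => simp [pairsOf_nil, mspec]
    | [a], _ => simp [pairsOf_single, mspec]
    | a :: b :: rest, hl => exact absurd rfl (hl a b rest)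

def isBit (b : Char) : Bool := b == '0' || b == '1'

lemma foldB_filter (l : List Char) :
    ∀ st : List Char × Option Char, l.foldl altStep st = (l.filter isBit).foldl altStep st := by
  induction l with
  | nil => intro st; rfl
  | cons x xs ih =>
    intro st
    by_cases hx : x = '0' ∨ x = '1'
    · have : isBit x = true := by rcases hx with h | h <;> simp [isBit, h]
      simp only [List.foldl_cons, List.filter_cons, this, if_pos, ih]
    · have : isBit x = false := by
        simp only [isBit, Bool.or_eq_false_iff, beq_eq_false_iff_ne]
        exact ⟨fun h => hx (Or.inl h), fun h => hx (Or.inr h)⟩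
      simp only [List.foldl_cons, List.filter_cons, this, Bool.false_eq_true, if_false]
      rw [show altStep st x = st by simp [altStep, hx]]
      exact ih st

lemma foldB_eq (l : List Char) (hb : ∀ x ∈ l, x = '0' ∨ x = '1') :
    ∀ out : List Char, (l.foldl altStep (out, none)).1 = out ++ mspec l := by
  induction l using mspec.induct with
  | case1 a b rest ih =>
    intro out
    have ha := hb a (by simp)
    have hbb := hb b (by simp)
    simp only [List.foldl_cons]
    rw [show altStep (out, none) a = (out, some a) by simp [altStep, ha]]
    rw [show altStep (out, some a) b = ((if a ≠ b then out ++ [a] else out), none) by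
      simp [altStep, hbb]]
    rw [ih (fun x hx => hb x (by simp [hx]))]
    conv_rhs => rw [mspec.eq_def]
    by_cases h : a = b <;> simp [h]
  | case2 l hl =>
    intro out
    match l, hl with
    | [], _ => simp [mspec]
    | [a], _ =>
      have ha := hb a (by simp)
      simp only [List.foldl_cons, List.foldl_nil]
      rw [show altStep (out, none) a = (out, some a) by simp [altStep, ha]]
      simp [mspec]
    | a :: b :: rest, hl => exact absurd rfl (hl a b rest)

lemma bits_of_filter (l : List Char) :
    ∀ x ∈ l.filter isBit, x = '0' ∨ x = '1' := by
  intro x hx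
  have := List.of_mem_filter hx
  simp only [isBit, Bool.or_eq_true, beq_iff_eq] at this
  exact this

-- ===== VERDICT (by name: the statement is the Claim_ definition above) =====
theorem decode_manchester_spec : Claim_equal_decode_manchester := by
  intro bits _
  unfold Spec_decode_manchester decode_manchester decode_manchester_alt
  dsimp only []
  rw [show (fun b => b == '0' || b == '1') = isBit from rfl]
  rw [foldB_filter]
  rw [foldB_eq _ (bits_of_filter bits.toList)]
  rw [show List.map
        (fun i => PySem.List.slice (List.filter isBit bits.toList) (some i) (some (i + 2)))
        (PySem.List.pyRange 0 (((List.filter isBit bits.toList).length : Int) - 1) 2)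
      = pairsOf (List.filter isBit bits.toList) from rfl]
  rw [foldA_eq _ (bits_of_filter bits.toList)]
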